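-- pv_equiv track=rewrite | github.com/haylibi/decision_trees | src/run.py | parent_branching
-- ===== SOURCE A (Python) =====
-- def order_vector(dic, pos):
--     '''retorna uma lista ordenada e convertida do atributo numero X associado a sua classe'''
--     v1 = []
--     for line in dic.items():
--         if line[0] == list(dic)[0]:	continue
--         v1.append([line[1][pos],line[1][-1]])
--     return sorted(v1)
--
-- def parent_branching(dic):
-- 	node = {}
-- 	vec = order_vector(dic, -1)
-- 	att = list(dic[list(dic)[0]])[-1]
--
-- 	node[att] = {}
-- 	node[att][vec[0][0]] = 0
--
-- 	for item in vec:
-- 		# change of result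
-- 		if not(item[1] in list(node[att])):
-- 			node[att][item[0]] = 0
--
-- 		node[att][item[0]] += 1
--
-- 	return node
-- ===== SOURCE B (Python) =====
-- def parent_branching(dic):
--     it = iter(dic.items())
--     att = next(it)[1][-1]
--     counts = {}
--     for _, row in it:
--         v = row[-1]
--         counts[v] = counts.get(v, 0) + 1
--     return {att: {v: counts[v] for v in sorted(counts)}}
-- ===== Notes on version B (the rewrite author's own statement) =====
-- stated objective: faster
-- what changed: B never sorts the data rows: it tallies class frequencies in one hash-dict pass over the unsorted rows (A sorts all rows first, rebuilding list(dic) per row inside order_vector, then counts with a dict-membership loop over the sorted vector), and only sorts the distinct class values at the end to emit keys in A's ascending insertion order.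
-- outside the precondition, e.g. on parent_branching({}): A raises IndexError, B raises StopIteration; on parent_branching({'h': ['c']}): A raises IndexError, B returns {'c': {}}; on parent_branching({'h': ['c'], 'r': []}): A raises IndexError, B raises IndexError
import Mathlib
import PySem

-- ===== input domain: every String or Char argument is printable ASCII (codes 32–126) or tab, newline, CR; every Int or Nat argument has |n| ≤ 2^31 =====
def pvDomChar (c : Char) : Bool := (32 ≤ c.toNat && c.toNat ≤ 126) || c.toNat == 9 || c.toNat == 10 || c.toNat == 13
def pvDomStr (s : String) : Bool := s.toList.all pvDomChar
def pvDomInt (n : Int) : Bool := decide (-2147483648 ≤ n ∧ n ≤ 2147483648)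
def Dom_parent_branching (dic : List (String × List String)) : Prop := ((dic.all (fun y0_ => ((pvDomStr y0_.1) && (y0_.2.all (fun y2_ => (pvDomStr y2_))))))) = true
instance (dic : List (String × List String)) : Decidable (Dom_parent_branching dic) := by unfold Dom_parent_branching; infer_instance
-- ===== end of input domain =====

-- B never sorts the rows: it counts class frequencies in one hash-dict pass over the unsorted
-- rows and sorts only the distinct class values at the end (objective: faster, as measured).

-- ===== PORT A =====
-- literal port of order_vector(dic, pos); dict 'dic' is the association list (first-match lookup)
def order_vector (dic : List (String × List String)) (pos : Int) : List (String × String) :=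
  let v1 := dic.foldl (fun v1 line =>
    if (dic.map Prod.fst).head? = some line.1 then v1
    else v1 ++ [(PySem.List.pyGetD line.2 pos "", PySem.List.pyGetD line.2 (-1) "")]) []
  PySem.List.sorted2 v1 Prod.fst Prod.snd

def parent_branching (dic : List (String × List String)) : List (String × List (String × Int)) :=
  let vec := order_vector dic (-1)
  let att := PySem.List.pyGetD ((PySem.Dict.mk dic).getD ((dic.map Prod.fst).headD "") []) (-1) ""
  let inner0 : PySem.Dict String Int := PySem.Dict.empty.insert (vec.headD ("", "")).1 0
  -- node[att][item[0]] += 1 : the key is always present here (item[0] = item[1]), so the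
  -- read-then-write is ported as insert of (getD + 1), which overwrites in place as Python does
  let inner := vec.foldl (fun nd item =>
    let nd' := if !(nd.contains item.2) then nd.insert item.1 0 else nd
    nd'.insert item.1 (nd'.getD item.1 0 + 1)) inner0
  [(att, inner.items)]

-- ===== PORT B =====
def parent_branching_alt (dic : List (String × List String)) : List (String × List (String × Int)) :=
  -- att = next(it)[1][-1]: first item of the dict (headD is only a totalizer; Pre_ gives dic ≠ [])
  let att := PySem.List.pyGetD (dic.headD ("", [])).2 (-1) ""
  -- counts[v] = counts.get(v, 0) + 1 over the remaining items
  let counts := dic.tail.foldl (fun (c : PySem.Dict String Int) p =>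
    c.insert (PySem.List.pyGetD p.2 (-1) "") (c.getD (PySem.List.pyGetD p.2 (-1) "") 0 + 1))
    PySem.Dict.empty
  -- {v: counts[v] for v in sorted(counts)}
  let inner := (PySem.List.sorted counts.keys (fun x => x)).foldl
    (fun (d : PySem.Dict String Int) v => d.insert v (counts.getD v 0)) PySem.Dict.empty
  [(att, inner.items)]

-- ===== PRECONDITION & SPEC =====
-- Pre_ excludes exactly: (a) dicts with fewer than two keys and dicts containing an empty
-- value list, on which Python A raises IndexError; (b) association lists with duplicate
-- keys, which do not encode any Python dict (the argument is a dict, whose keys are distinct).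
def Pre_parent_branching (dic : List (String × List String)) : Prop :=
  (dic.map Prod.fst).Nodup ∧ 2 ≤ dic.length ∧ ∀ p ∈ dic, p.2 ≠ []
instance (dic : List (String × List String)) : Decidable (Pre_parent_branching dic) := by unfold Pre_parent_branching; infer_instance

def pvWitness_parent_branching : (List (String × List String)) :=
  [("id", ["outlook", "play"]), ("1", ["sunny", "no"]), ("2", ["rain", "yes"]), ("3", ["rain", "yes"])]

def Spec_parent_branching (dic : List (String × List String)) (out : List (String × List (String × Int))) : Prop := out = parent_branching_alt dic
instance (dic : List (String × List String)) (out : List (String × List (String × Int))) : Decidable (Spec_parent_branching dic out) := by unfold Spec_parent_branching; infer_instance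

-- ===== CLAIM (what is proved, stated in full; the proofs are below) =====
def Claim_equal_parent_branching : Prop := ∀ (dic : List (String × List String)), Dom_parent_branching dic → Pre_parent_branching dic → Spec_parent_branching dic (parent_branching dic)

-- ===== LEMMAS AND PROOFS =====

-- Python's sorted on the diagonal pairs [x, x] is the plain sort, mapped onto the diagonal.
lemma insertBy_diag (x : String) (l : List String) :
    PySem.List.insertBy
      (fun a b : String × String => decide (a.1 < b.1) || (!decide (b.1 < a.1) && decide (a.2 < b.2)))
      (x, x) (l.map (fun y => (y, y)))
    = (PySem.List.insertBy (fun a b : String => decide (a < b)) x l).map (fun y => (y, y)) := by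
  induction l with
  | nil => rfl
  | cons y ys ih =>
    simp only [List.map_cons, PySem.List.insertBy]
    have hcond : (decide (x < y) || (!decide (y < x) && decide (x < y))) = decide (x < y) := by
      cases decide (x < y) <;> simp
    rw [hcond]
    by_cases hxy : x < y
    · have hb : decide (x < y) = true := decide_eq_true hxy
      simp only [hb, if_true, List.map_cons]
    · have hb : decide (x < y) = false := decide_eq_false hxy
      simp only [hb, Bool.false_eq_true, if_false, List.map_cons]
      exact congrArg _ ih

lemma foldl_insertBy_diag (l : List String) : ∀ (acc : List String),
    l.foldl (fun acc y =>
        PySem.List.insertBy (fun a b : String × String =>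
          decide (a.1 < b.1) || (!decide (b.1 < a.1) && decide (a.2 < b.2))) (y, y) acc)
      (acc.map (fun y => (y, y)))
    = (l.foldl (fun acc x => PySem.List.insertBy (fun a b : String => decide (a < b)) x acc) acc).map
        (fun y => (y, y)) := by
  induction l with
  | nil => intro acc; rfl
  | cons y ys ih =>
    intro acc
    rw [List.foldl_cons, List.foldl_cons, insertBy_diag y acc]
    exact ih _

lemma sorted2_diag (l : List String) :
    PySem.List.sorted2 (l.map (fun y => (y, y))) Prod.fst Prod.snd
      = (PySem.List.sorted l (fun y => y)).map (fun y => (y, y)) := by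
  unfold PySem.List.sorted2 PySem.List.sorted
  rw [List.foldl_map]
  exact foldl_insertBy_diag l []

-- A's v1 loop over the non-header rows appends the pair of each row.
lemma foldl_skip (o : Option String) (f : (String × List String) → String × String)
    (rest : List (String × List String))
    (h : ∀ p ∈ rest, ¬ (o = some p.1)) : ∀ (acc : List (String × String)),
    rest.foldl (fun v1 line => if o = some line.1 then v1 else v1 ++ [f line]) acc
      = acc ++ rest.map f := by
  induction rest with
  | nil => intro acc; simp
  | cons p ps ih =>
    intro acc
    rw [List.foldl_cons, if_neg (h p List.mem_cons_self),
      ih (fun q hq => h q (List.mem_cons_of_mem _ hq)) _]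
    simp

-- first-match lookup in an items list whose prefix avoids the key
lemma get?_append_last (cs : List (String × Int)) (k : String) (r : Int)
    (h : ∀ q ∈ cs, q.1 ≠ k) :
    (PySem.Dict.mk (cs ++ [(k, r)])).get? k = some r := by
  induction cs with
  | nil => simp [PySem.Dict.get?_mk_cons]
  | cons q qs ih =>
    rw [List.cons_append, PySem.Dict.get?_mk_cons]
    simp only [beq_iff_eq]
    rw [if_neg (h q List.mem_cons_self)]
    exact ih (fun p hp => h p (List.mem_cons_of_mem _ hp))

lemma getD_items_last (d : PySem.Dict String Int) (cs : List (String × Int)) (k : String) (r : Int)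
    (hd : d.items = cs ++ [(k, r)]) (h : ∀ q ∈ cs, q.1 ≠ k) :
    d.getD k 0 = r := by
  have hdm : d = PySem.Dict.mk (cs ++ [(k, r)]) := by
    have he : d = PySem.Dict.mk d.items := rfl
    rw [he, hd]
  rw [hdm, PySem.Dict.getD_eq_get?_getD, get?_append_last cs k r h]
  rfl

lemma map_if_replace (cs : List (String × Int)) (k : String) (v : Int)
    (h : ∀ q ∈ cs, q.1 ≠ k) :
    cs.map (fun p => if (p.1 == k) = true then (k, v) else p) = cs := by
  induction cs with
  | nil => rfl
  | cons q qs ih =>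
    simp only [List.map_cons]
    rw [if_neg (by simpa using h q List.mem_cons_self),
      ih (fun p hp => h p (List.mem_cons_of_mem _ hp))]

-- run keys of a sorted list: the distinct values after prev, in order
def rdk : String → List String → List String
  | _, [] => []
  | p, x :: xs => if x = p then rdk p xs else x :: rdk x xs

lemma rdk_gt (l : List String) : ∀ (p w : String),
    (∀ x ∈ l, p ≤ x) → l.Pairwise (· ≤ ·) → w ∈ rdk p l → p < w := by
  induction l with
  | nil => intro p w _ _ hw; simp [rdk] at hw
  | cons x xs ih =>
    intro p w hge hpw hw
    have hge' : ∀ y ∈ xs, x ≤ y := (List.pairwise_cons.mp hpw).1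
    by_cases hx : x = p
    · rw [rdk, if_pos hx] at hw
      exact ih p w (fun y hy => hge y (List.mem_cons_of_mem _ hy)) hpw.tail hw
    · rw [rdk, if_neg hx] at hw
      have hpx : p < x := lt_of_le_of_ne (hge x List.mem_cons_self) (Ne.symm hx)
      rcases List.mem_cons.mp hw with h | h
      · exact h ▸ hpx
      · exact lt_trans hpx (ih x w hge' hpw.tail h)

lemma rdk_pairwise (l : List String) : ∀ (p : String),
    (∀ x ∈ l, p ≤ x) → l.Pairwise (· ≤ ·) → (p :: rdk p l).Pairwise (· < ·) := by
  induction l with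
  | nil => intro p _ _; simp [rdk]
  | cons x xs ih =>
    intro p hge hpw
    have hge' : ∀ y ∈ xs, x ≤ y := (List.pairwise_cons.mp hpw).1
    by_cases hx : x = p
    · rw [rdk, if_pos hx]
      exact ih p (fun y hy => hge y (List.mem_cons_of_mem _ hy)) hpw.tail
    · rw [rdk, if_neg hx]
      have hpx : p < x := lt_of_le_of_ne (hge x List.mem_cons_self) (Ne.symm hx)
      have htail := ih x hge' hpw.tail
      refine List.pairwise_cons.mpr ⟨?_, htail⟩
      intro w hw
      rcases List.mem_cons.mp hw with h | h
      · exact h ▸ hpx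
      · exact lt_trans hpx (rdk_gt xs x w hge' hpw.tail h)

lemma rdk_mem_iff (l : List String) : ∀ (p w : String),
    (∀ x ∈ l, p ≤ x) → l.Pairwise (· ≤ ·) → (w ∈ p :: rdk p l ↔ w = p ∨ w ∈ l) := by
  induction l with
  | nil => intro p w _ _; simp [rdk]
  | cons x xs ih =>
    intro p w hge hpw
    have hge' : ∀ y ∈ xs, x ≤ y := (List.pairwise_cons.mp hpw).1
    by_cases hx : x = p
    · rw [rdk, if_pos hx]
      rw [ih p w (fun y hy => hge y (List.mem_cons_of_mem _ hy)) hpw.tail]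
      subst hx
      constructor
      · rintro (h | h) <;> simp [h]
      · rintro (h | h)
        · exact Or.inl h
        · rcases List.mem_cons.mp h with h1 | h1
          · exact Or.inl h1
          · exact Or.inr h1
    · rw [rdk, if_neg hx]
      have h2 := ih x w hge' hpw.tail
      constructor
      · intro h
        rcases List.mem_cons.mp h with h1 | h1
        · exact Or.inl h1
        · rcases (h2).mp h1 with h3 | h3
          · exact Or.inr (List.mem_cons.mpr (Or.inl h3))
          · exact Or.inr (List.mem_cons_of_mem _ h3)
      · rintro (h | h)
        · exact List.mem_cons.mpr (Or.inl h)
        · rcases List.mem_cons.mp h with h1 | h1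
          · exact List.mem_cons_of_mem _ (h2.mpr (Or.inl h1))
          · rcases h2.mpr (Or.inr h1) with h3
            exact List.mem_cons_of_mem _ h3

-- the heart of the equivalence: A's membership-counting dict loop over the sorted list
-- produces exactly one entry per distinct value, keyed in order, valued by its count
lemma loop_eq (l : List String) :
    ∀ (cs : List (String × Int)) (prev : String) (run : Int) (d : PySem.Dict String Int),
    d.items = cs ++ [(prev, run)] →
    (∀ q ∈ cs, q.1 < prev) →
    (∀ x ∈ l, prev ≤ x) → l.Pairwise (· ≤ ·) →
    (l.foldl (fun nd v =>
        (if !(nd.contains v) then nd.insert v 0 else nd).insert v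
          ((if !(nd.contains v) then nd.insert v 0 else nd).getD v 0 + 1)) d).items
      = cs ++ (prev :: rdk prev l).map
          (fun v => (v, (if v = prev then run else 0) + (l.count v : Int))) := by
  induction l with
  | nil =>
    intro cs prev run d hd _ _ _
    simpa [rdk] using hd
  | cons v vs ih =>
    intro cs prev run d hd hcs hge hpw
    have hne : ∀ q ∈ cs, q.1 ≠ prev := fun q hq => ne_of_lt (hcs q hq)
    have hcont : d.contains v = ((cs ++ [(prev, run)]).any (fun p => p.1 == v)) := by
      simp [PySem.Dict.contains, hd]
    have hge' : ∀ x ∈ vs, v ≤ x := (List.pairwise_cons.mp hpw).1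
    by_cases hv : v = prev
    · subst hv
      have hc : d.contains v = true := by simp [hcont]
      have hget : d.getD v 0 = run := getD_items_last d cs v run hd hne
      have hins : (d.insert v (run + 1)).items = cs ++ [(v, run + 1)] := by
        rw [PySem.Dict.items_insert_of_contains _ _ hc, hd]
        simp only [List.map_append]
        rw [map_if_replace cs v (run + 1) hne]
        simp
      rw [List.foldl_cons]
      simp only [hc, Bool.not_true, Bool.false_eq_true, if_false, hget]
      rw [ih cs v (run + 1) _ hins hcs hge' hpw.tail]
      congr 1
      rw [show rdk v (v :: vs) = rdk v vs by simp [rdk]]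
      simp only [List.map_cons]
      congr 1
      · simp only [List.count_cons_self, Prod.mk.injEq, true_and]
        push_cast; ring
      · apply List.map_congr_left
        intro w hw
        have hwv : v < w := rdk_gt vs v w hge' hpw.tail hw
        have hwne : w ≠ v := ne_of_gt hwv
        simp [hwne, ne_of_lt hwv]
    · have hlt : prev < v := lt_of_le_of_ne (hge v List.mem_cons_self) (Ne.symm hv)
      have hnotmem : prev ∉ v :: vs := by
        intro hmem
        rcases List.mem_cons.mp hmem with h | h
        · exact hv h.symm
        · exact absurd (hge' prev h) (not_le.mpr hlt)
      have hc : d.contains v = false := by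
        rw [hcont, List.any_eq_false]
        intro q hq
        rcases List.mem_append.mp hq with h1 | h1
        · simpa using ne_of_lt (lt_trans (hcs q h1) hlt)
        · simp only [List.mem_singleton] at h1
          subst h1
          simpa using ne_of_lt hlt
      have hins0 : (d.insert v 0).items = (cs ++ [(prev, run)]) ++ [(v, 0)] := by
        rw [PySem.Dict.items_insert_of_not_contains _ _ hc, hd]
      have hne' : ∀ q ∈ cs ++ [(prev, run)], q.1 ≠ v := by
        intro q hq
        rcases List.mem_append.mp hq with h1 | h1
        · exact ne_of_lt (lt_trans (hcs q h1) hlt)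
        · simp only [List.mem_singleton] at h1; subst h1; exact ne_of_lt hlt
      have hcs' : ∀ q ∈ cs ++ [(prev, run)], q.1 < v := by
        intro q hq
        rcases List.mem_append.mp hq with h1 | h1
        · exact lt_trans (hcs q h1) hlt
        · simp only [List.mem_singleton] at h1; subst h1; exact hlt
      have hc1 : (d.insert v 0).contains v = true := by
        simp [PySem.Dict.contains, hins0]
      have hget : (d.insert v 0).getD v 0 = 0 :=
        getD_items_last _ _ v 0 hins0 hne'
      have hins1 : ((d.insert v 0).insert v (0 + 1)).items = (cs ++ [(prev, run)]) ++ [(v, 1)] := by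
        rw [PySem.Dict.items_insert_of_contains _ _ hc1, hins0]
        simp only [List.map_append]
        rw [map_if_replace cs v (0 + 1) (fun q hq => ne_of_lt (lt_trans (hcs q hq) hlt))]
        simp [ne_of_lt hlt]
      rw [List.foldl_cons]
      simp only [hc, Bool.not_false, if_true, hget]
      rw [ih (cs ++ [(prev, run)]) v 1 _ (by simpa using hins1) hcs' hge' hpw.tail]
      rw [show rdk prev (v :: vs) = v :: rdk v vs by simp [rdk, hv]]
      simp only [List.map_cons, List.append_assoc, List.cons_append, List.nil_append]
      congr 1
      have hcount0 : (v :: vs).count prev = 0 := List.count_eq_zero.mpr hnotmem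
      congr 1
      · simp [hcount0]
      congr 1
      · simp only [if_neg hv, List.count_cons_self, Prod.mk.injEq, true_and]
        push_cast; ring
      · apply List.map_congr_left
        intro w hw
        have hwv : v < w := rdk_gt vs v w hge' hpw.tail hw
        simp [ne_of_gt hwv, ne_of_gt (lt_trans hlt hwv), ne_of_lt hwv]

-- dict-comprehension over distinct keys gives back exactly those pairs
lemma foldl_insert_items (ks : List String) (f : String → Int) (h : ks.Nodup) :
    (ks.foldl (fun (d : PySem.Dict String Int) v => d.insert v (f v)) PySem.Dict.empty).items
      = ks.map (fun v => (v, f v)) := by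
  have := PySem.Dict.items_foldl_insert_fresh ks (fun v => v) f
    (PySem.Dict.empty (κ := String) (ν := Int))
    (fun a _ => PySem.Dict.contains_empty a) (by simpa using h)
  simpa using this

-- ===== VERDICT (by name: the statement is the Claim_ definition above) =====
theorem parent_branching_spec : Claim_equal_parent_branching := by
  intro dic _ hpre
  obtain ⟨hnd, hlen, _⟩ := hpre
  match dic, hlen with
  | (k0, v0) :: rest, hlen =>
  have hrest : rest ≠ [] := by
    intro h; subst h; simp at hlen
  have hk0 : ∀ p ∈ rest, p.1 ≠ k0 := by
    intro p hp
    simp only [List.map_cons, List.nodup_cons] at hnd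
    intro he
    exact hnd.1 (he ▸ List.mem_map_of_mem hp)
  set g : String × List String → String := fun p => PySem.List.pyGetD p.2 (-1) "" with hg
  set vals : List String := rest.map g with hvals
  set svals : List String := PySem.List.sorted vals (fun y => y) with hsvals
  -- A's vec is the sorted class vector, on the diagonal
  have hvec : order_vector ((k0, v0) :: rest) (-1) = svals.map (fun y => (y, y)) := by
    unfold order_vector
    rw [List.foldl_cons, if_pos (by simp), foldl_skip _ _ rest
      (by intro p hp
          simp only [List.map_cons, List.head?_cons, Option.some.injEq]
          exact fun e => hk0 p hp e.symm) _]
    simp only [List.nil_append]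
    rw [show rest.map (fun p => (PySem.List.pyGetD p.2 (-1) "", PySem.List.pyGetD p.2 (-1) "")) =
        vals.map (fun y => (y, y)) by rw [hvals, List.map_map]; rfl]
    rw [sorted2_diag]
  -- svals nonempty
  have hsne : svals ≠ [] := by
    rw [hsvals, Ne, PySem.List.sorted_eq_nil_iff]
    simp [hvals, hrest]
  obtain ⟨h0, t, hst⟩ : ∃ h0 t, svals = h0 :: t := by
    cases hsv : svals with
    | nil => exact absurd hsv hsne
    | cons a b => exact ⟨a, b, rfl⟩
  -- sortedness facts
  have hpw : svals.Pairwise (· ≤ ·) := by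
    have := PySem.List.sorted_pairwise vals (fun y => y)
    simpa [hsvals] using this
  have hge : ∀ x ∈ svals, h0 ≤ x := by
    intro x hx
    have hpw' := hpw
    rw [hst] at hx hpw'
    rcases List.mem_cons.mp hx with h | h
    · exact le_of_eq h.symm
    · exact (List.pairwise_cons.mp hpw').1 x h
  -- attribute agreement
  have hatt : (PySem.Dict.mk ((k0, v0) :: rest)).getD k0 [] = v0 := by
    simp [PySem.Dict.getD_eq_get?_getD, PySem.Dict.get?_mk_cons]
  -- B's counting dict is Counter(vals)
  have hcounts : rest.foldl (fun (c : PySem.Dict String Int) p =>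
      c.insert (PySem.List.pyGetD p.2 (-1) "") (c.getD (PySem.List.pyGetD p.2 (-1) "") 0 + 1))
      PySem.Dict.empty = PySem.Dict.counter vals := by
    rw [hvals]
    have h1 : (rest.map g).foldl
        (fun (c : PySem.Dict String Int) x => c.insert x (c.getD x 0 + 1)) PySem.Dict.empty
        = rest.foldl (fun (c : PySem.Dict String Int) p =>
            c.insert (g p) (c.getD (g p) 0 + 1)) PySem.Dict.empty := List.foldl_map
    exact h1.symm.trans (PySem.Dict.foldl_insert_getD_add_one_eq_counter _)
  -- A's key list is B's sorted distinct-value list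
  have hkpw : (h0 :: rdk h0 svals).Pairwise (· < ·) := rdk_pairwise svals h0 hge hpw
  have hknd : (h0 :: rdk h0 svals).Nodup := hkpw.imp (fun h => ne_of_lt h)
  have hkeys : PySem.List.sorted (PySem.Set.ofList vals) (fun y => y) = h0 :: rdk h0 svals := by
    apply PySem.List.sorted_eq_of_perm_of_pairwise_lt
    · rw [List.perm_ext_iff_of_nodup hknd (PySem.Set.nodup_ofList vals)]
      intro w
      rw [rdk_mem_iff svals h0 w hge hpw, PySem.Set.mem_ofList]
      constructor
      · rintro (h | h)
        · have : h0 ∈ svals := by rw [hst]; exact List.mem_cons_self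
          exact (PySem.List.mem_sorted _ _ _ _).mp (h ▸ this)
        · exact (PySem.List.mem_sorted _ _ _ _).mp h
      · intro h
        exact Or.inr ((PySem.List.mem_sorted _ _ _ _).mpr h)
    · exact hkpw
  -- counts agree
  have hcount : ∀ w, svals.count w = vals.count w := by
    intro w
    exact (PySem.List.sorted_perm vals (fun y => y) false).count_eq w
  -- unfold both sides
  show parent_branching _ = parent_branching_alt _
  unfold parent_branching parent_branching_alt
  simp only [List.map_cons, List.headD_cons, List.tail_cons]
  rw [hvec, hatt, hcounts, PySem.Dict.keys_counter, hkeys]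
  have hheadA : ((svals.map (fun y => (y, y))).headD ("", "")).1 = h0 := by
    rw [hst]; rfl
  rw [hheadA]
  have hinit : (PySem.Dict.empty.insert h0 (0 : Int)).items = [] ++ [(h0, (0 : Int))] := by
    rw [PySem.Dict.items_insert_of_not_contains _ _ (PySem.Dict.contains_empty h0)]
    rfl
  rw [List.foldl_map]
  simp only []
  rw [loop_eq svals [] h0 0 _ hinit (by simp) hge hpw]
  rw [foldl_insert_items _ _ hknd]
  simp only [List.nil_append]
  congr 1
  congr 1
  apply List.map_congr_left
  intro w _
  rw [PySem.Dict.getD_counter, ← hcount w]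
  split_ifs <;> simp
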